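-- pv_equiv track=rewrite | github.com/shradhakedia/Oops-pyhton | dict_freq_pos.py | freq_pos
-- ===== SOURCE A (Python) =====
-- def freq_pos(userslist):
--     """This function takes the user list and
--     returns the frequency and position
--     the elements of that list"""
--     position={} #empty dictionary to store positions
--     frequency={i:userslist.count(i) for i in userslist} #dictionary comprehension for counting the frequency
--     for i in range(len(userslist)):#loop to store the positions in the position dictionary
--         if userslist[i] not in position: #checks if the element is not present in list
--             position[userslist[i]]=[i+1]#creates a list with position of the element
--         else:#else element is already present in list
--             position[userslist[i]].append(i+1)#appends the list with the position
--     return frequency,position #returns the dictionary that has frequency and position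
-- ===== SOURCE B (Python) =====
-- def freq_pos(userslist):
--     """Inverted decomposition: first compute the distinct values in
--     first-occurrence order, then build each dictionary by one comprehension
--     per value that scans the whole list (no index loop, no membership tests,
--     no in-place appends)."""
--     distinct = list(dict.fromkeys(userslist))
--     frequency = {v: userslist.count(v) for v in distinct}
--     position = {v: [i + 1 for i, x in enumerate(userslist) if x == v]
--                 for v in distinct}
--     return frequency, position
-- ===== Notes on version B (the rewrite author's own statement) =====
-- stated objective: alternative
-- what changed: B inverts the traversal: it first deduplicates the list into the distinct values in first-occurrence order, then fills both dictionaries by one whole-list scan per distinct value (comprehensions), instead of A's per-element count comprehension plus an index loop that mutates position via membership tests and appends.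
import Mathlib
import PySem

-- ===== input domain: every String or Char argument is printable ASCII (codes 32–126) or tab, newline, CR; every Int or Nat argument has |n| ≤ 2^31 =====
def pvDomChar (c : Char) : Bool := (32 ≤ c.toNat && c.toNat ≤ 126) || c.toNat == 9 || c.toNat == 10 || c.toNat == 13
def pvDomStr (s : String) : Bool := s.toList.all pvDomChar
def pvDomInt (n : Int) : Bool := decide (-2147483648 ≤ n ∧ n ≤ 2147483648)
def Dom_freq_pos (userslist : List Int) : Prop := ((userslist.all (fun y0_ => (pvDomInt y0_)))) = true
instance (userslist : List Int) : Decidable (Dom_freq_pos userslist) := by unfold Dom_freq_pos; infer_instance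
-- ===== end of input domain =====

-- B inverts the traversal: it deduplicates the list first and then builds each
-- dictionary by one whole-list scan per distinct value, instead of A's
-- per-element count comprehension plus a mutating index loop (objective: alternative).

-- ===== PORT A =====
-- literal port: frequency = {i: userslist.count(i) for i in userslist};
-- then the index loop filling position (userslist[i] is always in range, so pyGetD's default is dead).
def freq_pos (userslist : List Int) : (List (Int × Int)) × (List (Int × List Int)) :=
  let frequency : PySem.Dict Int Int :=
    userslist.foldl (fun d i => d.insert i ((PySem.List.count userslist i : Int))) PySem.Dict.empty
  let position : PySem.Dict Int (List Int) :=
    (PySem.List.pyRange 0 (PySem.List.len userslist) 1).foldl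
      (fun d i =>
        let x := PySem.List.pyGetD userslist i 0
        if !(d.contains x) then d.insert x [i + 1]
        else d.modify x [] (fun v => v ++ [i + 1])) PySem.Dict.empty
  (frequency.items, position.items)

-- ===== PORT B =====
-- literal port of Source B: distinct = list(dict.fromkeys(userslist)) is PySem.List.dedup;
-- each dict comprehension over distinct is a foldl of Dict.insert; the inner list
-- comprehension [i+1 for i, x in enumerate(userslist) if x == v] is filter-then-map over enumerate.
def freq_pos_alt (userslist : List Int) : (List (Int × Int)) × (List (Int × List Int)) :=
  let distinct := PySem.List.dedup userslist
  let frequency : PySem.Dict Int Int :=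
    distinct.foldl (fun d v => d.insert v ((PySem.List.count userslist v : Int))) PySem.Dict.empty
  let position : PySem.Dict Int (List Int) :=
    distinct.foldl
      (fun d v => d.insert v
        (((PySem.List.enumerate userslist).filter (fun p => p.2 == v)).map (fun p => p.1 + 1)))
      PySem.Dict.empty
  (frequency.items, position.items)

-- ===== PRECONDITION & SPEC =====
def Spec_freq_pos (userslist : List Int) (out : (List (Int × Int)) × (List (Int × List Int))) : Prop := out = freq_pos_alt userslist
instance (userslist : List Int) (out : (List (Int × Int)) × (List (Int × List Int))) : Decidable (Spec_freq_pos userslist out) := by unfold Spec_freq_pos; infer_instance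

-- ===== CLAIM (what is proved, stated in full; the proofs are below) =====
def Claim_equal_freq_pos : Prop := ∀ (userslist : List Int), Dom_freq_pos userslist → Spec_freq_pos userslist (freq_pos userslist)

-- ===== LEMMAS AND PROOFS =====

-- A's membership-test branch and B's plain insert agree on an absent key
theorem modify_not_contains (d : PySem.Dict Int (List Int)) (k : Int) (f : List Int → List Int)
    (h : d.contains k = false) : d.modify k [] f = d.insert k (f []) := by
  simp [PySem.Dict.modify, PySem.Dict.getD_of_not_contains _ _ h]

-- an insert-fold whose value depends only on the key: final lookup
theorem getD_foldl_insert_const (f : Int → Int) :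
    ∀ (l : List Int) (d : PySem.Dict Int Int) (k : Int) (dflt : Int),
      (l.foldl (fun d x => d.insert x (f x)) d).getD k dflt
        = if k ∈ l then f k else d.getD k dflt := by
  intro l
  induction l with
  | nil => simp
  | cons x xs ih =>
    intro d k dflt
    simp only [List.foldl_cons, ih, PySem.Dict.getD_insert, List.mem_cons]
    by_cases hx : k ∈ xs <;> by_cases he : k = x <;> simp [hx, he]

-- B's insert-fold over the (duplicate-free) distinct list, as an items list
theorem alt_items (ν : Type) (g : Int → ν) (l : List Int) (hn : l.Nodup) :
    (l.foldl (fun d v => d.insert v (g v)) (PySem.Dict.empty : PySem.Dict Int ν)).items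
      = l.map (fun v => (v, g v)) := by
  have := PySem.Dict.items_foldl_insert_fresh l (fun v => v) g
      (PySem.Dict.empty : PySem.Dict Int ν) (by intro a _; simp) (by simpa using hn)
  simpa using this

-- A's frequency comprehension, as an items list
theorem freqA_items (L : List Int) :
    (L.foldl (fun d i => d.insert i ((PySem.List.count L i : Int))) PySem.Dict.empty).items
      = (PySem.Set.ofList L).map (fun k => (k, (PySem.List.count L k : Int))) := by
  have hkeys : (L.foldl (fun d i => d.insert i ((PySem.List.count L i : Int)))
      PySem.Dict.empty).keys = PySem.Set.ofList L := by
    rw [PySem.Dict.keys_foldl_insert L (fun _ i => (PySem.List.count L i : Int))]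
    simp [PySem.Set.update_nil_left]
  have hnodup : (L.foldl (fun d i => d.insert i ((PySem.List.count L i : Int)))
      PySem.Dict.empty).keys.Nodup := by
    rw [hkeys]; exact PySem.Set.nodup_ofList L
  rw [PySem.Dict.items_eq_map_keys _ hnodup 0, hkeys]
  apply List.map_congr_left
  intro k hk
  have hkL : k ∈ L := by simpa [PySem.Set.mem_ofList] using hk
  simp [getD_foldl_insert_const, hkL]

-- A's position loop, as an items list (first rewrite the index loop to an enumerate fold)
theorem posA_items (L : List Int) :
    ((PySem.List.pyRange 0 (PySem.List.len L) 1).foldl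
      (fun d i =>
        let x := PySem.List.pyGetD L i 0
        if !(d.contains x) then d.insert x [i + 1]
        else d.modify x [] (fun v => v ++ [i + 1])) PySem.Dict.empty).items
    = (PySem.Set.ofList L).map (fun k =>
        (k, ((PySem.List.enumerate L).filter (fun p => p.2 == k)).map (fun p => p.1 + 1))) := by
  have hloop : (PySem.List.pyRange 0 (PySem.List.len L) 1).foldl
      (fun d i =>
        let x := PySem.List.pyGetD L i 0
        if !(d.contains x) then d.insert x [i + 1]
        else d.modify x [] (fun v => v ++ [i + 1])) PySem.Dict.empty
      = (PySem.List.enumerate L).foldl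
          (fun d p => d.modify p.2 [] (fun v => v ++ [p.1 + 1])) PySem.Dict.empty := by
    rw [PySem.List.enumerate_eq_map_pyRange L 0, List.foldl_map]
    congr 1
    funext d i
    by_cases h : d.contains (PySem.List.pyGetD L i 0)
    · simp [h]
    · simp only [Bool.not_eq_true] at h
      simp [h, modify_not_contains _ _ _ h]
  rw [hloop]
  set E := PySem.List.enumerate L with hE
  set pos : PySem.Dict Int (List Int) :=
    E.foldl (fun d p => d.modify p.2 [] (fun v => v ++ [p.1 + 1])) PySem.Dict.empty with hpos
  have hkeys : pos.keys = PySem.Set.ofList L := by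
    rw [hpos, PySem.Dict.keys_foldl_modify_key E (fun p => p.2) [] (fun _ p v => v ++ [p.1 + 1])]
    simp [hE, PySem.List.map_snd_enumerate, PySem.Set.update_nil_left]
  have hnodup : pos.keys.Nodup := by
    rw [hkeys]; exact PySem.Set.nodup_ofList L
  rw [PySem.Dict.items_eq_map_keys pos hnodup [], hkeys]
  apply List.map_congr_left
  intro k _
  have h := PySem.Dict.getD_foldl_modify_append (E.map (fun p => (p.2, p.1 + 1)))
    (PySem.Dict.empty : PySem.Dict Int (List Int)) k
  rw [List.foldl_map] at h
  have hget : pos.getD k [] =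
      ((E.map (fun p => (p.2, p.1 + 1))).filter (fun q => q.1 == k)).map (fun q => q.2) := by
    rw [hpos]; simpa using h
  rw [hget, List.filter_map, List.map_map]
  rfl

theorem freq_pos_spec : Claim_equal_freq_pos := by
  intro L _
  show _ = _
  simp only [freq_pos, freq_pos_alt]
  rw [freqA_items, posA_items, alt_items Int _ _ (by simp),
      alt_items (List Int) _ _ (by simp),
      PySem.List.dedup_eq_ofList]
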